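-- pv_equiv track=rewrite | github.com/Com4n/task8 | task8/mat.py | count_clusters
-- ===== SOURCE A (Python) =====
-- def count_clusters(matrix, rows, columns, cluster_size):
--     visited = [[False] * columns for _ in range(rows)]
--     clusters = 0
--
--     def dfs(r, c):
--         if r < 0 or r >= rows or c < 0 or c >= columns or matrix[r][c] == 0 or visited[r][c]:
--             return 0
--         visited[r][c] = True
--         size = 1
--         size += dfs(r-1, c)
--         size += dfs(r+1, c)
--         size += dfs(r, c-1)
--         size += dfs(r, c+1)
--         return size
--
--     for r in range(rows):
--         for c in range(columns):
--             if matrix[r][c] == 1 and not visited[r][c]: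
--                 if dfs(r, c) == cluster_size:
--                     clusters += 1
--     return clusters
-- ===== SOURCE B (Python) =====
-- def count_clusters(matrix, rows, columns, cluster_size):
--     visited = [[False] * columns for _ in range(rows)]
--     clusters = 0
--     for r in range(rows):
--         for c in range(columns):
--             if matrix[r][c] == 1 and not visited[r][c]:
--                 size = 0
--                 stack = [(r, c)]
--                 while stack:
--                     i, j = stack.pop()
--                     if i < 0 or i >= rows or j < 0 or j >= columns or matrix[i][j] == 0 or visited[i][j]:
--                         continue
--                     visited[i][j] = True
--                     size += 1
--                     stack.append((i, j + 1))
--                     stack.append((i, j - 1))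
--                     stack.append((i + 1, j))
--                     stack.append((i - 1, j))
--                 if size == cluster_size:
--                     clusters += 1
--     return clusters
-- ===== Notes on version B (the rewrite author's own statement) =====
-- stated objective: alternative
-- what changed: The recursive four-way DFS (which can hit Python's recursion limit on large clusters) is replaced by an iterative flood fill with an explicit stack that pops a cell, skips it if out of bounds/zero/visited, otherwise marks it and pushes its four neighbours.
import Mathlib
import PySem

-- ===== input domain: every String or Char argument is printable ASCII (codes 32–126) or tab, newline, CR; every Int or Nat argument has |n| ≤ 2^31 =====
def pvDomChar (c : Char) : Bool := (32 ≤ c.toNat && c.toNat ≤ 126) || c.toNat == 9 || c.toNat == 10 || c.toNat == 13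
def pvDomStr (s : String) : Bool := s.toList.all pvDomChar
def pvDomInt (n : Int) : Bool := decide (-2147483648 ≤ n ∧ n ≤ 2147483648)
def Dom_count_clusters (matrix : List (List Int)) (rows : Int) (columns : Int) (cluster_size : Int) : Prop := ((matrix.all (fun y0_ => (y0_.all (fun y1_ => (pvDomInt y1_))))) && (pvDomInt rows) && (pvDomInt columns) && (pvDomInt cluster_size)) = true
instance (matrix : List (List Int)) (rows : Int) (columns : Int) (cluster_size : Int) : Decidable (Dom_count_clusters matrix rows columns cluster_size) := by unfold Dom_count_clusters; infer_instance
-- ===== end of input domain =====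

-- B replaces A's recursive four-way DFS by an iterative explicit-stack flood fill; same return value (alternative decomposition, no speed claim).


-- ===== PORT A =====
-- shared 2-d access helpers (used by both ports; under Pre_ every access is in
-- range, so the out-of-range defaults are never observed by either port)
def pvGetM (matrix : List (List Int)) (r c : Int) : Int :=
  if 0 ≤ r ∧ 0 ≤ c then (matrix.getD r.toNat []).getD c.toNat 0 else 0

def pvGetVis (v : List (List Bool)) (r c : Int) : Bool :=
  if 0 ≤ r ∧ 0 ≤ c then (v.getD r.toNat []).getD c.toNat true else true

def pvSetRow : List Bool → Nat → List Bool
  | [], _ => []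
  | _ :: t, 0 => true :: t
  | b :: t, n + 1 => b :: pvSetRow t n

def pvSet2d : List (List Bool) → Nat → Nat → List (List Bool)
  | [], _, _ => []
  | row :: t, 0, c => pvSetRow row c :: t
  | row :: t, r + 1, c => row :: pvSet2d t r c

-- visited[r][c] = True
def pvSet (v : List (List Bool)) (r c : Int) : List (List Bool) :=
  if 0 ≤ r ∧ 0 ≤ c then pvSet2d v r.toNat c.toNat else v

-- number of unvisited (False) entries; used as fuel for A's recursion and as
-- the termination measure of B's loop
def pvFalseCount (v : List (List Bool)) : Nat :=
  (v.map (fun row => row.count false)).sum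

-- literal port of A's recursive dfs; the fuel is only a termination device:
-- fuel = pvFalseCount visited + 1 always suffices (each recursive level marks a cell)
def pvDfs (matrix : List (List Int)) (rows columns : Int) :
    Nat → List (List Bool) → Int → Int → (List (List Bool)) × Int
  | 0, visited, _, _ => (visited, 0)
  | fuel + 1, visited, r, c =>
    if r < 0 ∨ rows ≤ r ∨ c < 0 ∨ columns ≤ c ∨ pvGetM matrix r c = 0 ∨ pvGetVis visited r c = true then
      (visited, 0)
    else
      let p1 := pvDfs matrix rows columns fuel (pvSet visited r c) (r - 1) c
      let p2 := pvDfs matrix rows columns fuel p1.1 (r + 1) c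
      let p3 := pvDfs matrix rows columns fuel p2.1 r (c - 1)
      let p4 := pvDfs matrix rows columns fuel p3.1 r (c + 1)
      (p4.1, 1 + p1.2 + p2.2 + p3.2 + p4.2)

def count_clusters (matrix : List (List Int)) (rows : Int) (columns : Int) (cluster_size : Int) : Int :=
  (((PySem.List.pyRange 0 rows 1).foldl (fun st r =>
      (PySem.List.pyRange 0 columns 1).foldl (fun st2 c =>
        if pvGetM matrix r c = 1 ∧ pvGetVis st2.1 r c = false then
          let p := pvDfs matrix rows columns (pvFalseCount st2.1 + 1) st2.1 r c
          (p.1, if p.2 = cluster_size then st2.2 + 1 else st2.2)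
        else st2) st)
    ((List.range rows.toNat).map (fun _ => List.replicate columns.toNat false), (0 : Int))).2 : Int)

-- ===== PORT B =====
-- used by the termination proof of pvFlood (cited by name in decreasing_by)
theorem pvSetRow_count (row : List Bool) (c : Nat)
    (h : row.getD c true = false) : (pvSetRow row c).count false + 1 = row.count false := by
  induction row generalizing c with
  | nil => simp [List.getD] at h
  | cons b t ih =>
    cases c with
    | zero =>
      simp [List.getD] at h
      subst h
      simp [pvSetRow]
    | succ n =>
      simp [List.getD] at h
      have := ih n (by simpa [List.getD] using h)
      simp [pvSetRow, List.count_cons]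
      omega

theorem pvFalseCount_pvSet (v : List (List Bool)) (i j : Int)
    (h : pvGetVis v i j = false) : pvFalseCount (pvSet v i j) + 1 = pvFalseCount v := by
  by_cases hn : 0 ≤ i ∧ 0 ≤ j
  · simp only [pvGetVis, if_pos hn] at h
    simp only [pvSet, if_pos hn]
    generalize i.toNat = a at h ⊢
    generalize j.toNat = b at h ⊢
    induction v generalizing a with
    | nil => simp [List.getD] at h
    | cons row t ih =>
      cases a with
      | zero =>
        simp [List.getD] at h
        simp [pvSet2d, pvFalseCount]
        have := pvSetRow_count row b h
        omega
      | succ n =>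
        simp [List.getD] at h
        have := ih n (by simpa [List.getD] using h)
        simp [pvSet2d, pvFalseCount] at this ⊢
        omega
  · simp [pvGetVis, if_neg hn] at h

theorem pvFalseCount_pvSet_lt (v : List (List Bool)) (i j : Int)
    (h : pvGetVis v i j = false) : pvFalseCount (pvSet v i j) < pvFalseCount v := by
  have := pvFalseCount_pvSet v i j h
  omega

-- literal port of B's while-loop flood fill (stack top = list head)
def pvFlood (matrix : List (List Int)) (rows columns : Int)
    (visited : List (List Bool)) (stack : List (Int × Int)) (size : Int) :
    (List (List Bool)) × Int :=
  match stack with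
  | [] => (visited, size)
  | (i, j) :: rest =>
    if h : i < 0 ∨ rows ≤ i ∨ j < 0 ∨ columns ≤ j ∨ pvGetM matrix i j = 0 ∨ pvGetVis visited i j = true then
      pvFlood matrix rows columns visited rest size
    else
      pvFlood matrix rows columns (pvSet visited i j)
        ((i - 1, j) :: (i + 1, j) :: (i, j - 1) :: (i, j + 1) :: rest) (size + 1)
termination_by (pvFalseCount visited, stack.length)
decreasing_by
  · exact Prod.Lex.right _ (by simp)
  · exact Prod.Lex.left _ _ (pvFalseCount_pvSet_lt visited i j (by
      push_neg at h
      exact Bool.not_eq_true _ ▸ (by simpa using h.2.2.2.2.2)))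

def count_clusters_alt (matrix : List (List Int)) (rows : Int) (columns : Int) (cluster_size : Int) : Int :=
  (((PySem.List.pyRange 0 rows 1).foldl (fun st r =>
      (PySem.List.pyRange 0 columns 1).foldl (fun st2 c =>
        if pvGetM matrix r c = 1 ∧ pvGetVis st2.1 r c = false then
          let q := pvFlood matrix rows columns st2.1 [(r, c)] 0
          (q.1, if q.2 = cluster_size then st2.2 + 1 else st2.2)
        else st2) st)
    ((List.range rows.toNat).map (fun _ => List.replicate columns.toNat false), (0 : Int))).2 : Int)

-- ===== PRECONDITION & SPEC =====
-- Pre_ excludes exactly the inputs on which Python A raises IndexError: a positive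
-- scan area whose rows or row lengths are shorter than rows/columns.
def Pre_count_clusters (matrix : List (List Int)) (rows : Int) (columns : Int) (cluster_size : Int) : Prop :=
  0 < rows → 0 < columns →
    (rows ≤ matrix.length ∧ ∀ row ∈ matrix.take rows.toNat, columns ≤ row.length)

instance (matrix : List (List Int)) (rows : Int) (columns : Int) (cluster_size : Int) : Decidable (Pre_count_clusters matrix rows columns cluster_size) := by unfold Pre_count_clusters; infer_instance

def pvWitness_count_clusters : List (List Int) × Int × Int × Int := ([[1, 0], [0, 1]], 2, 2, 1)

def Spec_count_clusters (matrix : List (List Int)) (rows : Int) (columns : Int) (cluster_size : Int) (out : Int) : Prop := out = count_clusters_alt matrix rows columns cluster_size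
instance (matrix : List (List Int)) (rows : Int) (columns : Int) (cluster_size : Int) (out : Int) : Decidable (Spec_count_clusters matrix rows columns cluster_size out) := by unfold Spec_count_clusters; infer_instance

-- ===== CLAIM (what is proved, stated in full; the proofs are below) =====
def Claim_equal_count_clusters : Prop := ∀ (matrix : List (List Int)) (rows : Int) (columns : Int) (cluster_size : Int), Dom_count_clusters matrix rows columns cluster_size → Pre_count_clusters matrix rows columns cluster_size → Spec_count_clusters matrix rows columns cluster_size (count_clusters matrix rows columns cluster_size)

-- ===== LEMMAS AND PROOFS =====

-- dfs never unmarks a cell: the count of unvisited cells does not increase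
theorem pvDfs_mono (matrix : List (List Int)) (rows columns : Int) (fuel : Nat) :
    ∀ (v : List (List Bool)) (r c : Int),
      pvFalseCount (pvDfs matrix rows columns fuel v r c).1 ≤ pvFalseCount v := by
  induction fuel with
  | zero => intro v r c; simp [pvDfs]
  | succ n ih =>
    intro v r c
    by_cases hg : r < 0 ∨ rows ≤ r ∨ c < 0 ∨ columns ≤ c ∨ pvGetM matrix r c = 0 ∨ pvGetVis v r c = true
    · simp [pvDfs, hg]
    · have hvis : pvGetVis v r c = false := by
        push_neg at hg
        simpa using hg.2.2.2.2.2
      have hset := pvFalseCount_pvSet v r c hvis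
      simp only [pvDfs, if_neg hg]
      have h1 := ih (pvSet v r c) (r - 1) c
      have h2 := ih (pvDfs matrix rows columns n (pvSet v r c) (r - 1) c).1 (r + 1) c
      have h3 := ih (pvDfs matrix rows columns n (pvDfs matrix rows columns n (pvSet v r c) (r - 1) c).1 (r + 1) c).1 r (c - 1)
      have h4 := ih (pvDfs matrix rows columns n (pvDfs matrix rows columns n (pvDfs matrix rows columns n (pvSet v r c) (r - 1) c).1 (r + 1) c).1 r (c - 1)).1 r (c + 1)
      omega

-- the simulation: popping (r,c) from the stack does exactly what one call of A's dfs does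
theorem pvFlood_sim (matrix : List (List Int)) (rows columns : Int) (fuel : Nat) :
    ∀ (v : List (List Bool)), pvFalseCount v < fuel →
      ∀ (r c : Int) (S : List (Int × Int)) (size : Int),
        pvFlood matrix rows columns v ((r, c) :: S) size =
          pvFlood matrix rows columns (pvDfs matrix rows columns fuel v r c).1 S
            (size + (pvDfs matrix rows columns fuel v r c).2) := by
  induction fuel with
  | zero => intro v hv; omega
  | succ n ih =>
    intro v hv r c S size
    by_cases hg : r < 0 ∨ rows ≤ r ∨ c < 0 ∨ columns ≤ c ∨ pvGetM matrix r c = 0 ∨ pvGetVis v r c = true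
    · rw [pvFlood]
      simp [pvDfs, hg]
    · have hvis : pvGetVis v r c = false := by
        push_neg at hg
        simpa using hg.2.2.2.2.2
      have hset := pvFalseCount_pvSet v r c hvis
      have hv1 : pvFalseCount (pvSet v r c) < n := by omega
      rw [pvFlood]
      rw [dif_neg hg]
      have m1 := pvDfs_mono matrix rows columns n (pvSet v r c) (r - 1) c
      have m2 := pvDfs_mono matrix rows columns n (pvDfs matrix rows columns n (pvSet v r c) (r - 1) c).1 (r + 1) c
      have m3 := pvDfs_mono matrix rows columns n (pvDfs matrix rows columns n (pvDfs matrix rows columns n (pvSet v r c) (r - 1) c).1 (r + 1) c).1 r (c - 1)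
      rw [ih (pvSet v r c) hv1 (r - 1) c]
      rw [ih _ (by omega) (r + 1) c]
      rw [ih _ (by omega) r (c - 1)]
      rw [ih _ (by omega) r (c + 1)]
      simp only [pvDfs, if_neg hg]
      congr 1
      ring
  
-- flood fill from one seed = one call of A's dfs (with sufficient fuel)
theorem pvFlood_cell (matrix : List (List Int)) (rows columns : Int)
    (v : List (List Bool)) (r c : Int) :
    pvFlood matrix rows columns v [(r, c)] 0 =
      pvDfs matrix rows columns (pvFalseCount v + 1) v r c := by
  rw [pvFlood_sim matrix rows columns (pvFalseCount v + 1) v (by omega) r c [] 0]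
  rw [pvFlood]
  simp

-- ===== VERDICT (by name: the statement is the Claim_ definition above) =====
theorem count_clusters_spec : Claim_equal_count_clusters := by
  intro matrix rows columns cluster_size _ _
  unfold Spec_count_clusters count_clusters count_clusters_alt
  congr 2
  funext st r
  congr 1
  funext st2 c
  rw [pvFlood_cell]
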